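-- pv_equiv track=rewrite | github.com/selfreferencing/erdos-86-lean | Zeroless/exp60_carry_cascade.py | find_five_cascades
-- ===== SOURCE A (Python) =====
-- def get_digits_and_carries(n):
--     """
--     Get digits of 2^n and the carry sequence when computing 2^{n+1}.
--     Returns (digits, carries) where:
--     - digits[i] = i-th digit of 2^n (LSB first)
--     - carries[i] = carry entering position i when computing 2^{n+1}
--     """
--     power = 2 ** n
--     digits = []
--     while power > 0:
--         digits.append(power % 10)
--         power //= 10
--
--     # Compute carry sequence
--     carries = [0]  # Initial carry is 0
--     carry = 0
--     for d in digits: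
--         val = 2 * d + carry
--         carry = val // 10
--         carries.append(carry)
--
--     return digits, carries[:-1]  # Remove last carry (overflow)
--
-- def find_five_cascades(n):
--     """
--     Find consecutive blocks of 5s in 2^n.
--     Returns list of (start_pos, length) tuples.
--     """
--     digits, _ = get_digits_and_carries(n)
--
--     cascades = []
--     i = 0
--     while i < len(digits):
--         if digits[i] == 5:
--             start = i
--             while i < len(digits) and digits[i] == 5:
--                 i += 1
--             length = i - start
--             if length >= 2:  # Only report cascades of length >= 2
--                 cascades.append((start, length))
--         else:
--             i += 1
--
--     return cascades
-- ===== SOURCE B (Python) =====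
-- def find_five_cascades(n):
--     """
--     Find consecutive blocks of 5s in 2^n.
--     Returns list of (start_pos, length) tuples.
--
--     Alternative strategy: run-length-encode the whole digit sequence in one
--     pass (carrying the current run separately), then keep the runs of 5s of
--     length >= 2.
--     """
--     power = 2 ** n
--     digits = []
--     while power > 0:
--         digits.append(power % 10)
--         power //= 10
--
--     runs = []  # completed maximal runs, as (start, value, length)
--     cur = None  # run currently being built
--     for i, d in enumerate(digits):
--         if cur is not None and cur[1] == d:
--             cur = (cur[0], d, cur[2] + 1)
--         else:
--             if cur is not None:
--                 runs.append(cur)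
--             cur = (i, d, 1)
--     if cur is not None:
--         runs.append(cur)
--
--     return [(s, l) for (s, v, l) in runs if v == 5 and l >= 2]
-- ===== Notes on version B (the rewrite author's own statement) =====
-- stated objective: alternative
-- what changed: The manual index-based start/inner-while run scanner over the digit list is replaced by a single run-length-encoding pass over all digits followed by a filter keeping runs of 5s of length >= 2.
import Mathlib
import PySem

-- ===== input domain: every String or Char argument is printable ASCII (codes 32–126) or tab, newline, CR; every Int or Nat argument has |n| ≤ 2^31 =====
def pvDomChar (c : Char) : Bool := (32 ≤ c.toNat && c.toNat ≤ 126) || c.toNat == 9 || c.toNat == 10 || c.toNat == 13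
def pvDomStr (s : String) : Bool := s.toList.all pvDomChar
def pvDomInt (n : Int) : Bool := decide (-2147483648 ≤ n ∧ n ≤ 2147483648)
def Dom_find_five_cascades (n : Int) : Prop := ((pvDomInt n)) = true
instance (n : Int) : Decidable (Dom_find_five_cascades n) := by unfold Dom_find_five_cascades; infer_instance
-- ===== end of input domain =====

-- B replaces A's manual index-based run scanner (outer while + inner while) by a single
-- run-length-encoding pass over all digits followed by a filter; same cost, alternative algorithm.


-- ===== PORT A =====

-- Shared by both ports (both Pythons open with the identical `while power > 0` digit loop).
-- `while power > 0: digits.append(power % 10); power //= 10` for a positive int power,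
-- with `digits` as the accumulator exactly as Python grows it by appending.
def pvDigitsLoop (power : Nat) (digits : List Int) : List Int :=
  if h : 0 < power then pvDigitsLoop (power / 10) (digits ++ [((power % 10 : Nat) : Int)])
  else digits
  termination_by power
  decreasing_by exact Nat.div_lt_self h (by norm_num)

-- Python's `power = 2 ** n` followed by that loop. For n < 0, Python's 2**n is a FLOAT in
-- (0,1): the loop yields a single fractional digit (or none after underflow), which neither
-- program's integer comparisons (== 5) can ever match, so for both outputs the digit list is
-- modeled EXACTLY by []. For n ≥ 0 this is the exact int digit list of 2^n, LSB first.
def pvPow2Digits (n : Int) : List Int :=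
  if n < 0 then [] else pvDigitsLoop ((2:Nat) ^ n.toNat) []

-- A's helper get_digits_and_carries (the carry list is computed as in A but unused by A's caller).
def pvGetDigitsAndCarries (n : Int) : List Int × List Int :=
  let digits := pvPow2Digits n
  let cs := digits.foldl (fun (p : List Int × Int) d =>
      let val := 2 * d + p.2
      let carry := PySem.Int.floordiv val 10
      (p.1 ++ [carry], carry)) ([(0:Int)], (0:Int))
  (digits, cs.1.dropLast)

-- inner `while i < len(digits) and digits[i] == 5: i += 1` (returns the final i)
def pvInner (digits : List Int) (i : Nat) : Nat :=
  if h : i < digits.length ∧ digits.getD i 0 = 5 then pvInner digits (i + 1) else i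
  termination_by digits.length - i
  decreasing_by omega

-- pvOuter needs this for termination: the inner while never moves i backwards.
theorem pvInner_ge (digits : List Int) (i : Nat) : i ≤ pvInner digits i := by
  induction i using pvInner.induct (digits := digits) with
  | case1 i h ih => rw [pvInner, dif_pos h]; omega
  | case2 i h => rw [pvInner, dif_neg h]

-- outer `while i < len(digits): …` with the accumulating cascades list
def pvOuter (digits : List Int) (i : Nat) (acc : List (Int × Int)) : List (Int × Int) :=
  if h : i < digits.length then
    if h5 : digits.getD i 0 = 5 then
      let j := pvInner digits i
      let len := j - i
      pvOuter digits j (if 2 ≤ len then acc ++ [((i : Int), (len : Int))] else acc)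
    else pvOuter digits (i + 1) acc
  else acc
  termination_by digits.length - i
  decreasing_by
  · have hj : i + 1 ≤ pvInner digits i := by
      rw [pvInner, dif_pos ⟨h, h5⟩]; exact pvInner_ge digits (i + 1)
    omega
  · omega

def find_five_cascades (n : Int) : List (Int × Int) :=
  let digits := (pvGetDigitsAndCarries n).1
  pvOuter digits 0 []

-- ===== PORT B =====

-- one step of B's RLE loop body: extend the current run or flush it and open a new one
def pvRleStep (st : List (Int × Int × Int) × Option (Int × Int × Int)) (p : Int × Int) :
    List (Int × Int × Int) × Option (Int × Int × Int) :=
  match st.2 with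
  | some (s, v, l) =>
      if v = p.2 then (st.1, some (s, v, l + 1))
      else (st.1 ++ [(s, v, l)], some (p.1, p.2, 1))
  | none => (st.1, some (p.1, p.2, 1))

-- B's trailing `if cur is not None: runs.append(cur)`
def pvRleFinish (st : List (Int × Int × Int) × Option (Int × Int × Int)) :
    List (Int × Int × Int) :=
  match st.2 with
  | some c => st.1 ++ [c]
  | none => st.1

def find_five_cascades_alt (n : Int) : List (Int × Int) :=
  let digits := pvPow2Digits n
  -- `for i, d in enumerate(digits)`: the fold carries enumerate's running index itself
  let st := digits.foldl
    (fun (st : Int × (List (Int × Int × Int) × Option (Int × Int × Int))) d =>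
      (st.1 + 1, pvRleStep st.2 (st.1, d))) (0, ([], none))
  let runs := pvRleFinish st.2
  (runs.filter (fun r => r.2.1 == 5 && decide ((2:Int) ≤ r.2.2))).map (fun r => (r.1, r.2.2))

-- ===== PRECONDITION & SPEC =====
def Spec_find_five_cascades (n : Int) (out : List (Int × Int)) : Prop := out = find_five_cascades_alt n
instance (n : Int) (out : List (Int × Int)) : Decidable (Spec_find_five_cascades n out) := by unfold Spec_find_five_cascades; infer_instance

-- ===== CLAIM (what is proved, stated in full; the proofs are below) =====
def Claim_equal_find_five_cascades : Prop := ∀ (n : Int), Dom_find_five_cascades n → Spec_find_five_cascades n (find_five_cascades n)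

-- ===== LEMMAS AND PROOFS =====

-- Common reference: the cascade list of a digit list starting at (Int) position i.
def pvRef : List Int → Int → List (Int × Int)
  | [], _ => []
  | d :: t, i =>
    if d = 5 then
      (if 2 ≤ (t.takeWhile (fun x => x == 5)).length + 1 then
        [(i, (((t.takeWhile (fun x => x == 5)).length + 1 : Nat) : Int))] else [])
        ++ pvRef (t.dropWhile (fun x => x == 5)) (i + ((t.takeWhile (fun x => x == 5)).length + 1 : Nat))
    else pvRef t (i + 1)
  termination_by l _ => l.length
  decreasing_by
  · have := List.length_dropWhile_le (fun x => x == (5:Int)) t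
    simp only [List.length_cons]; omega
  · simp

theorem pv_dropWhile_eq_drop (l : List Int) (p : Int → Bool) :
    l.dropWhile p = l.drop (l.takeWhile p).length := by
  induction l with
  | nil => simp
  | cons a t ih => by_cases h : p a <;> simp [List.takeWhile_cons, h, ih]

theorem pvInner_char (digits : List Int) (i : Nat) :
    pvInner digits i = i + ((digits.drop i).takeWhile (fun x => x == 5)).length := by
  induction i using pvInner.induct (digits := digits) with
  | case1 i h ih =>
    obtain ⟨hlt, h5⟩ := h
    rw [pvInner, dif_pos ⟨hlt, h5⟩]
    rw [ih, List.drop_eq_getElem_cons hlt, List.takeWhile_cons]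
    have : digits[i] = (5:Int) := by rw [← List.getD_eq_getElem digits 0 hlt]; exact h5
    simp [this]; omega
  | case2 i h =>
    rw [pvInner, dif_neg h]
    by_cases hlt : i < digits.length
    · have h5 : ¬ digits.getD i 0 = 5 := fun hc => h ⟨hlt, hc⟩
      rw [List.drop_eq_getElem_cons hlt, List.takeWhile_cons]
      have : ¬ digits[i] = (5:Int) := by rw [← List.getD_eq_getElem digits 0 hlt]; exact h5
      simp [this]
    · rw [List.drop_eq_nil_of_le (by omega)]; simp

theorem pvOuter_char (digits : List Int) (i : Nat) (acc : List (Int × Int)) :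
    i ≤ digits.length → pvOuter digits i acc = acc ++ pvRef (digits.drop i) (i : Int) := by
  induction i, acc using pvOuter.induct (digits := digits) with
  | case1 i acc h h5 j len ih =>
    intro hle
    have hd : digits[i] = (5:Int) := by rw [← List.getD_eq_getElem digits 0 h]; exact h5
    have hdrop : digits.drop i = digits[i] :: digits.drop (i + 1) := List.drop_eq_getElem_cons h
    set tw := ((digits.drop (i+1)).takeWhile (fun x => x == (5:Int))).length with htw
    have hinner : pvInner digits i = i + (tw + 1) := by
      rw [pvInner_char, hdrop, List.takeWhile_cons]
      simp [hd, htw]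
    have htwle : tw ≤ (digits.drop (i+1)).length :=
      (List.takeWhile_sublist _).length_le
    have hlen2 : (digits.drop (i+1)).length = digits.length - (i+1) := List.length_drop ..
    rw [pvOuter, dif_pos h, dif_pos h5]
    show pvOuter digits (pvInner digits i)
        (if 2 ≤ pvInner digits i - i then acc ++ [((i : Int), ((pvInner digits i - i : Nat) : Int))] else acc)
      = acc ++ pvRef (digits.drop i) (i : Int)
    have ih' := ih
    simp only [j, len, dite_eq_ite] at ih'
    rw [hinner] at ih' ⊢
    rw [ih' (by omega)]
    conv_rhs => rw [hdrop]
    rw [pvRef]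
    simp only [hd, if_true]
    have hdw : (digits.drop (i+1)).dropWhile (fun x => x == (5:Int))
        = digits.drop (i + (tw + 1)) := by
      rw [pv_dropWhile_eq_drop, ← htw, List.drop_drop]
      congr 1; omega
    rw [hdw]
    have hcast : ((i : Int) + ((tw + 1 : Nat) : Int)) = ((i + (tw + 1) : Nat) : Int) := by push_cast; ring
    rw [hcast]
    by_cases h2 : 2 ≤ tw + 1
    · have h2' : 2 ≤ i + (tw + 1) - i := by omega
      rw [if_pos h2', ← htw, if_pos h2]
      have : ((i + (tw + 1) - i : Nat) : Int) = ((tw + 1 : Nat) : Int) := by congr 1; omega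
      rw [this, List.append_assoc]
    · have h2' : ¬ 2 ≤ i + (tw + 1) - i := by omega
      rw [if_neg h2', ← htw, if_neg h2]
      simp
  | case2 i acc h h5 ih =>
    intro hle
    rw [pvOuter, dif_pos h, dif_neg h5]
    rw [ih (by omega)]
    have hd : ¬ digits[i] = (5:Int) := by rw [← List.getD_eq_getElem digits 0 h]; exact h5
    conv_rhs => rw [List.drop_eq_getElem_cons h, pvRef]
    simp only [hd, if_false]
    have hc : ((i : Int) + 1) = ((i + 1 : Nat) : Int) := by push_cast; ring
    rw [hc]
  | case3 i acc h =>
    intro hle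
    rw [pvOuter, dif_neg h]
    rw [List.drop_eq_nil_of_le (by omega), pvRef]
    simp

-- B side: the RLE of a digit list with start positions, in structural form.
def pvRleRef : List Int → Int → List (Int × Int × Int)
  | [], _ => []
  | d :: t, i =>
    (i, d, (((t.takeWhile (fun x => x == d)).length + 1 : Nat) : Int))
      :: pvRleRef (t.dropWhile (fun x => x == d)) (i + ((t.takeWhile (fun x => x == d)).length + 1 : Nat))
  termination_by l _ => l.length
  decreasing_by
  have := List.length_dropWhile_le (fun x => x == d) t
  simp only [List.length_cons]; omega

theorem pvFold_extend (t : List Int) (i : Int) (rs : List (Int × Int × Int)) (s v l : Int) :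
    pvRleFinish (List.foldl pvRleStep (rs, some (s, v, l)) (PySem.List.enumerate t i))
      = rs ++ [(s, v, l + ((t.takeWhile (fun x => x == v)).length : Int))]
          ++ pvRleRef (t.dropWhile (fun x => x == v))
              (i + ((t.takeWhile (fun x => x == v)).length : Int)) := by
  induction t generalizing i rs s v l with
  | nil => simp [pvRleRef, pvRleFinish]
  | cons d t ih =>
    rw [PySem.List.enumerate_cons, List.foldl_cons]
    by_cases hdv : d = v
    · subst hdv
      have hstep : pvRleStep (rs, some (s, d, l)) (i, d) = (rs, some (s, d, l + 1)) := by
        simp [pvRleStep]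
      rw [hstep, ih]
      simp
      constructor <;> ring
    · have hvd : ¬ v = d := fun hh => hdv hh.symm
      have hstep : pvRleStep (rs, some (s, v, l)) (i, d)
          = (rs ++ [(s, v, l)], some (i, d, 1)) := by
        simp [pvRleStep, hvd]
      rw [hstep, ih]
      rw [List.takeWhile_cons, List.dropWhile_cons]
      have hbv : (d == v) = false := by simp [hdv]
      simp only [hbv, Bool.false_eq_true, if_false, List.length_nil, Int.natCast_zero, add_zero]
      rw [pvRleRef]
      simp only [List.append_assoc, List.cons_append, List.nil_append]
      push_cast
      ring_nf

theorem pvFold_empty (t : List Int) (i : Int) :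
    pvRleFinish (List.foldl pvRleStep ([], none) (PySem.List.enumerate t i)) = pvRleRef t i := by
  cases t with
  | nil => simp [pvRleRef, pvRleFinish]
  | cons d t =>
    rw [PySem.List.enumerate_cons, List.foldl_cons]
    have hstep : pvRleStep ([], none) (i, d) = ([], some (i, d, 1)) := by simp [pvRleStep]
    rw [hstep, pvFold_extend, pvRleRef]
    simp only [List.nil_append, List.cons_append]
    congr 2
    · push_cast; ring
    · push_cast; ring

-- the index-carrying fold of the port is the fold over enumerate
theorem pvFold_counter (ds : List Int) (i : Int)
    (st : List (Int × Int × Int) × Option (Int × Int × Int)) :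
    (ds.foldl (fun (st : Int × (List (Int × Int × Int) × Option (Int × Int × Int))) d =>
        (st.1 + 1, pvRleStep st.2 (st.1, d))) (i, st)).2
      = List.foldl pvRleStep st (PySem.List.enumerate ds i) := by
  induction ds generalizing i st with
  | nil => simp
  | cons d t ih => rw [List.foldl_cons, PySem.List.enumerate_cons, List.foldl_cons, ih]

-- skipping a block of non-5 digits moves pvRef forward one position per digit
theorem pvRef_skip (l rest : List Int) (j : Int) (h : ∀ x ∈ l, x ≠ 5) :
    pvRef (l ++ rest) j = pvRef rest (j + (l.length : Int)) := by
  induction l generalizing j with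
  | nil => simp
  | cons a l ih =>
    have ha : a ≠ 5 := h a (by simp)
    rw [List.cons_append, pvRef]
    simp only [ha, if_false]
    rw [ih (j + 1) (fun x hx => h x (List.mem_cons_of_mem _ hx))]
    congr 1
    simp only [List.length_cons]
    push_cast
    ring

theorem pvFilter_rle (ds : List Int) (i : Int) :
    ((pvRleRef ds i).filter (fun r => r.2.1 == 5 && decide ((2:Int) ≤ r.2.2))).map
        (fun r => (r.1, r.2.2)) = pvRef ds i := by
  induction ds, i using pvRleRef.induct with
  | case1 i => simp [pvRleRef, pvRef]
  | case2 d t i ih =>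
    rw [pvRleRef, List.filter_cons]
    by_cases hd : d = (5:Int)
    · subst hd
      rw [pvRef, if_pos (show (5:Int) = 5 from rfl)]
      set tw := (t.takeWhile (fun x => x == (5:Int))).length with htw
      by_cases h2 : 2 ≤ tw + 1
      · have hb : (((5:Int) == 5) && decide ((2:Int) ≤ (((tw + 1 : Nat)) : Int))) = true := by
          simp; omega
        rw [if_pos hb, if_pos h2, List.map_cons, ih]
        rfl
      · have hb : ¬ ((((5:Int) == 5) && decide ((2:Int) ≤ (((tw + 1 : Nat)) : Int))) = true) := by
          simp; omega
        rw [if_neg hb, if_neg h2, ih, List.nil_append]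
    · have hb : ¬ (((d == (5:Int)) && decide ((2:Int) ≤ (((t.takeWhile (fun x => x == d)).length + 1 : Nat) : Int))) = true) := by
        simp [hd]
      rw [if_neg hb, ih]
      -- pvRef over the whole run of non-5 digits d equals pvRef stepping one-by-one
      have hsplit : d :: t
          = (d :: t.takeWhile (fun x => x == d)) ++ t.dropWhile (fun x => x == d) := by
        simp [List.takeWhile_append_dropWhile]
      have hall : ∀ x ∈ d :: t.takeWhile (fun x => x == d), x ≠ 5 := by
        intro x hx
        rcases List.mem_cons.mp hx with hx | hx
        · subst hx; exact hd
        · have := List.mem_takeWhile_imp hx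
          simp at this; subst this; exact hd
      conv_rhs => rw [hsplit]
      rw [pvRef_skip _ _ _ hall]
      have hlen : ((((t.takeWhile (fun x => x == d)).length + 1 : Nat)) : Int)
          = (((d :: t.takeWhile (fun x => x == d)).length : Nat) : Int) := by
        simp only [List.length_cons]
      rw [hlen]

-- ===== VERDICT (by name: the statement is the Claim_ definition above) =====
theorem find_five_cascades_spec : Claim_equal_find_five_cascades := by
  intro n _
  unfold Spec_find_five_cascades find_five_cascades find_five_cascades_alt pvGetDigitsAndCarries
  simp only []
  rw [pvFold_counter, pvFold_empty, pvFilter_rle]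
  rw [pvOuter_char _ 0 [] (by omega)]
  simp
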